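-- pv_equiv track=rewrite | github.com/mrftt12/ADL | tests/test_utils.py | _calculate_mlp_flops
-- ===== SOURCE A (Python) =====
-- from typing import Dict, List, Tuple, Any, Optional
--
-- def _calculate_mlp_flops(input_size: int, hidden_sizes: List[int], output_size: int) -> int:
--     """Calculate FLOPs for MLP (approximate)."""
--     total_flops = 0
--     current_size = input_size
--
--     for hidden_size in hidden_sizes:
--         total_flops += current_size * hidden_size  # matrix multiplication
--         current_size = hidden_size
--
--     total_flops += current_size * output_size  # output layer
--
--     return total_flops
-- ===== SOURCE B (Python) =====
-- from typing import List
--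
-- def _calculate_mlp_flops(input_size: int, hidden_sizes: List[int], output_size: int) -> int:
--     """Calculate FLOPs for MLP (approximate) by divide-and-conquer on the layer chain."""
--     sizes = [input_size] + list(hidden_sizes) + [output_size]
--
--     def go(lo: int, hi: int) -> int:
--         # FLOPs of the adjacent-layer products sizes[k] * sizes[k+1] for lo <= k < hi
--         if hi - lo == 1:
--             return sizes[lo] * sizes[lo + 1]
--         if hi <= lo:
--             return 0
--         mid = (lo + hi) // 2
--         return go(lo, mid) + go(mid, hi)
--
--     return go(0, len(sizes) - 1)
-- ===== Notes on version B (the rewrite author's own statement) =====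
-- stated objective: alternative
-- what changed: Replaces A's stateful left-to-right loop (running current_size accumulator plus a separate out-of-loop output-layer term) by building the full layer-size chain and summing the adjacent-pair products with a divide-and-conquer recursion that splits the index interval at its midpoint.
import Mathlib
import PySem

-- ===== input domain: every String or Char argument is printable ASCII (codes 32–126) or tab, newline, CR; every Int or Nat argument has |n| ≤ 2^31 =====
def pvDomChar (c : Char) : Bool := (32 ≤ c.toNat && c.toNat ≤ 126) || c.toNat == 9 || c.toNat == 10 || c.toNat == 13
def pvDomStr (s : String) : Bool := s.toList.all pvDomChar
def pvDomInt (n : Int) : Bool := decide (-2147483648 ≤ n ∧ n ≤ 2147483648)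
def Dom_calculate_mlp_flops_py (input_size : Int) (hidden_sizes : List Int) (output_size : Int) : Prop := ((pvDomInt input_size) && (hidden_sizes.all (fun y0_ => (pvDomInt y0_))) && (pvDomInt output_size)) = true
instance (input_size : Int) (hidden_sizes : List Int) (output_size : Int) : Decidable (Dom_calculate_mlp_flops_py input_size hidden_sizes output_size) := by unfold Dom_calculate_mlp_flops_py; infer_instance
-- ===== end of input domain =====

-- B replaces A's stateful accumulator loop by a divide-and-conquer over the full layer-size chain (alternative decomposition, same cost).

-- ===== PORT A =====
-- A: single pass with a running current_size accumulator, then the output-layer term.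
def calculate_mlp_flops_py (input_size : Int) (hidden_sizes : List Int) (output_size : Int) : Int :=
  let st := hidden_sizes.foldl
    (fun (s : Int × Int) hidden_size => (s.1 + s.2 * hidden_size, hidden_size))
    (0, input_size)
  st.1 + st.2 * output_size

-- ===== PORT B =====
-- B helper go(lo,hi): sum of sizes[k]*sizes[k+1] for lo ≤ k < hi, splitting the interval at the midpoint.
-- Python's sizes[lo] indexing is always in range here (0 ≤ lo < hi ≤ len-1), so `sizes[k]?.getD 0` is exact;
-- (lo+hi)//2 on the nonnegative indices is Nat division.
def pvGo (sizes : List Int) (lo hi : Nat) : Int :=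
  if hi - lo = 1 then (sizes[lo]?.getD 0) * (sizes[lo + 1]?.getD 0)
  else if hi ≤ lo then 0
  else pvGo sizes lo ((lo + hi) / 2) + pvGo sizes ((lo + hi) / 2) hi
termination_by hi - lo
decreasing_by all_goals omega

-- B: build the full layer-size chain, then divide-and-conquer over the adjacent-pair index interval.
def calculate_mlp_flops_py_alt (input_size : Int) (hidden_sizes : List Int) (output_size : Int) : Int :=
  let sizes := [input_size] ++ hidden_sizes ++ [output_size]
  pvGo sizes 0 (sizes.length - 1)

-- ===== PRECONDITION & SPEC =====
def Spec_calculate_mlp_flops_py (input_size : Int) (hidden_sizes : List Int) (output_size : Int) (out : Int) : Prop := out = calculate_mlp_flops_py_alt input_size hidden_sizes output_size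
instance (input_size : Int) (hidden_sizes : List Int) (output_size : Int) (out : Int) : Decidable (Spec_calculate_mlp_flops_py input_size hidden_sizes output_size out) := by unfold Spec_calculate_mlp_flops_py; infer_instance

-- ===== CLAIM (what is proved, stated in full; the proofs are below) =====
def Claim_equal_calculate_mlp_flops_py : Prop := ∀ (input_size : Int) (hidden_sizes : List Int) (output_size : Int), Dom_calculate_mlp_flops_py input_size hidden_sizes output_size → Spec_calculate_mlp_flops_py input_size hidden_sizes output_size (calculate_mlp_flops_py input_size hidden_sizes output_size)

-- ===== LEMMAS AND PROOFS =====

-- The structural "chain sum" both programs compute: c*h1 + h1*h2 + … + hk*o.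
def chainSum : Int → List Int → Int → Int
  | c, [], o => c * o
  | c, h :: t, o => c * h + chainSum h t o

-- The indexed form pvGo computes: Σ_{k=lo}^{lo+n-1} sizes[k]*sizes[k+1].
def idxSum (sizes : List Int) (lo n : Nat) : Int :=
  ((List.range' lo n).map (fun k => (sizes[k]?.getD 0) * (sizes[k + 1]?.getD 0))).sum

lemma idxSum_split (sizes : List Int) (lo a b : Nat) :
    idxSum sizes lo a + idxSum sizes (lo + a) b = idxSum sizes lo (a + b) := by
  unfold idxSum
  rw [← List.sum_append, ← List.map_append]
  congr 1
  simpa using (List.range'_append lo a b 1).symm ▸ rfl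

lemma pvGo_eq (sizes : List Int) : ∀ (n lo hi : Nat), hi - lo = n →
    pvGo sizes lo hi = idxSum sizes lo n := by
  intro n
  induction n using Nat.strong_induction_on with
  | _ n ih =>
    intro lo hi hn
    unfold pvGo
    split_ifs with h1 h2
    · subst hn; rw [h1]
      simp [idxSum, List.range'_succ]
    · have : n = 0 := by omega
      simp [this, idxSum]
    · have h2' : ¬ hi ≤ lo := h2
      have hge : 2 ≤ hi - lo := by omega
      set mid := (lo + hi) / 2 with hmid
      have hlt1 : lo < mid := by omega
      have hlt2 : mid < hi := by omega
      rw [ih (mid - lo) (by omega) lo mid rfl, ih (hi - mid) (by omega) mid hi rfl]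
      have h3 : lo + (mid - lo) = mid := by omega
      have h4 : (mid - lo) + (hi - mid) = n := by omega
      calc idxSum sizes lo (mid - lo) + idxSum sizes mid (hi - mid)
          = idxSum sizes lo (mid - lo) + idxSum sizes (lo + (mid - lo)) (hi - mid) := by rw [h3]
        _ = idxSum sizes lo ((mid - lo) + (hi - mid)) := idxSum_split ..
        _ = idxSum sizes lo n := by rw [h4]

lemma idx_chain (sizes : List Int) : ∀ (hs : List Int) (c o : Int) (lo : Nat),
    sizes.drop lo = c :: (hs ++ [o]) →
    idxSum sizes lo (hs.length + 1) = chainSum c hs o := by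
  intro hs
  induction hs with
  | nil =>
    intro c o lo hd
    have h0 : sizes[lo]? = some c := by
      have e : (sizes.drop lo)[0]? = sizes[lo + 0]? := List.getElem?_drop
      simpa [hd] using e.symm
    have h1 : sizes[lo + 1]? = some o := by
      have e : (sizes.drop lo)[1]? = sizes[lo + 1]? := List.getElem?_drop
      simpa [hd] using e.symm
    simp [idxSum, List.range'_succ, chainSum, h0, h1]
  | cons h tl ih =>
    intro c o lo hd
    have h0 : sizes[lo]? = some c := by
      have e : (sizes.drop lo)[0]? = sizes[lo + 0]? := List.getElem?_drop
      simpa [hd] using e.symm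
    have h1 : sizes[lo + 1]? = some h := by
      have e : (sizes.drop lo)[1]? = sizes[lo + 1]? := List.getElem?_drop
      simpa [hd] using e.symm
    have hd' : sizes.drop (lo + 1) = h :: (tl ++ [o]) := by
      have := congrArg (List.drop 1) hd
      rw [List.drop_drop] at this
      simpa [Nat.add_comm] using this
    have := ih h o (lo + 1) hd'
    simp only [idxSum, List.range'_succ, List.map_cons, List.sum_cons, List.length_cons] at *
    rw [h0, h1]
    simp only [h1, Option.getD_some] at this
    simp [chainSum, this]

-- A's loop invariant: accumulator t, current size c.
lemma flops_loop_eq (hs : List Int) : ∀ (c t o : Int),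
    (hs.foldl (fun (s : Int × Int) h => (s.1 + s.2 * h, h)) (t, c)).1 +
      (hs.foldl (fun (s : Int × Int) h => (s.1 + s.2 * h, h)) (t, c)).2 * o
    = t + chainSum c hs o := by
  induction hs with
  | nil => intro c t o; simp [chainSum]
  | cons h tl ih =>
    intro c t o
    simp only [List.foldl_cons, chainSum]
    rw [ih]
    ring

lemma alt_eq_chainSum (i : Int) (hs : List Int) (o : Int) :
    calculate_mlp_flops_py_alt i hs o = chainSum i hs o := by
  show pvGo ([i] ++ hs ++ [o]) 0 (([i] ++ hs ++ [o]).length - 1) = chainSum i hs o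
  have hlen : ([i] ++ hs ++ [o]).length - 1 = hs.length + 1 := by simp
  rw [hlen, pvGo_eq _ (hs.length + 1) 0 (hs.length + 1) rfl]
  exact idx_chain _ hs i o 0 (by simp)

-- ===== VERDICT (by name: the statement is the Claim_ definition above) =====
theorem calculate_mlp_flops_py_spec : Claim_equal_calculate_mlp_flops_py := by
  intro i hs o _
  show _ = _
  unfold calculate_mlp_flops_py
  rw [alt_eq_chainSum]
  simpa using flops_loop_eq hs i 0 o
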